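-- pv_equiv track=rewrite | github.com/jianzhnie/Kimi2-PCL | utils/pretrain_config.py | _extract_torchrun_section
-- ===== SOURCE A (Python) =====
-- def _extract_torchrun_section(lines: list[str]) -> list[str]:
--     out: list[str] = []
--     in_cmd = False
--     for ln in lines:
--         if not in_cmd and 'torchrun' in ln and 'pretrain_gpt.py' in ln:
--             in_cmd = True
--         if in_cmd:
--             out.append(ln)
--             if 'tee' in ln and 'TRAIN_LOG_PATH' in ln:
--                 break
--     return out
-- ===== SOURCE B (Python) =====
-- def _extract_torchrun_section(lines: list[str]) -> list[str]:
--     start = next((i for i, ln in enumerate(lines)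
--                   if 'torchrun' in ln and 'pretrain_gpt.py' in ln), None)
--     if start is None:
--         return []
--     tail = lines[start:]
--     end = next((i for i, ln in enumerate(tail)
--                 if 'tee' in ln and 'TRAIN_LOG_PATH' in ln), None)
--     return tail if end is None else tail[:end + 1]
-- ===== Notes on version B (the rewrite author's own statement) =====
-- stated objective: simpler
-- what changed: Replaces the stateful flag loop with break by locating the start index (first line matching torchrun/pretrain_gpt.py), then the inclusive terminator index in the tail, and returning a slice.
import Mathlib
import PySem

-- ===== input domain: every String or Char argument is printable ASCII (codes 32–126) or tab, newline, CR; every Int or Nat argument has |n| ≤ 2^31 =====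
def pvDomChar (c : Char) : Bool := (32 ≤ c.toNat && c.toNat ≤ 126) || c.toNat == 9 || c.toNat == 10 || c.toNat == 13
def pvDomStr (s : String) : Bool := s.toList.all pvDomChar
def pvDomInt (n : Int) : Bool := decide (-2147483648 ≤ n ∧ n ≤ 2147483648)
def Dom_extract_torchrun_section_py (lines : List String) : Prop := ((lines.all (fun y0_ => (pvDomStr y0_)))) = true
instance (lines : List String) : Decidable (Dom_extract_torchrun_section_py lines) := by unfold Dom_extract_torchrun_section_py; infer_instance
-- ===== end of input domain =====

-- B replaces A's stateful flag loop (with break) by start-index + inclusive-terminator-index and a slice; objective: simpler.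

-- ===== PORT A =====
-- A's for-loop with the mutable flag `in_cmd` and `break`, as structural recursion over the lines.
def extractGoA : List String → Bool → List String
  | [], _ => []
  | ln :: rest, in_cmd =>
    let in_cmd' := if !in_cmd && PySem.Str.isIn "torchrun" ln && PySem.Str.isIn "pretrain_gpt.py" ln
                   then true else in_cmd
    if in_cmd' then
      if PySem.Str.isIn "tee" ln && PySem.Str.isIn "TRAIN_LOG_PATH" ln then [ln]  -- append then break
      else ln :: extractGoA rest in_cmd'
    else extractGoA rest in_cmd'

def extract_torchrun_section_py (lines : List String) : List String :=
  extractGoA lines false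

-- ===== PORT B =====
def extractIsStart (ln : String) : Bool :=
  PySem.Str.isIn "torchrun" ln && PySem.Str.isIn "pretrain_gpt.py" ln

def extractIsEnd (ln : String) : Bool :=
  PySem.Str.isIn "tee" ln && PySem.Str.isIn "TRAIN_LOG_PATH" ln

def extract_torchrun_section_py_alt (lines : List String) : List String :=
  match lines.findIdx? extractIsStart with
  | none => []
  | some s =>
    let tail := lines.drop s
    match tail.findIdx? extractIsEnd with
    | none => tail
    | some e => tail.take (e + 1)

-- ===== PRECONDITION & SPEC =====
def Spec_extract_torchrun_section_py (lines : List String) (out : List String) : Prop := out = extract_torchrun_section_py_alt lines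
instance (lines : List String) (out : List String) : Decidable (Spec_extract_torchrun_section_py lines out) := by unfold Spec_extract_torchrun_section_py; infer_instance

-- ===== CLAIM (what is proved, stated in full; the proofs are below) =====
def Claim_equal_extract_torchrun_section_py : Prop := ∀ (lines : List String), Dom_extract_torchrun_section_py lines → Spec_extract_torchrun_section_py lines (extract_torchrun_section_py lines)

-- ===== LEMMAS AND PROOFS =====

-- the "already inside the command block" phase of both programs agree: A's loop with the flag set
-- equals B's inclusive take-to-terminator.
theorem extractGoA_true (lines : List String) :
    extractGoA lines true =
      (match lines.findIdx? extractIsEnd with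
       | none => lines
       | some e => lines.take (e + 1)) := by
  induction lines with
  | nil => rfl
  | cons ln rest ih =>
    rw [List.findIdx?_cons]
    by_cases he : extractIsEnd ln = true
    · have he' : (PySem.Str.isIn "tee" ln && PySem.Str.isIn "TRAIN_LOG_PATH" ln) = true := he
      simp only [extractGoA, Bool.not_true, Bool.false_and, he']
      simp [he]
    · rw [Bool.not_eq_true] at he
      have he' : (PySem.Str.isIn "tee" ln && PySem.Str.isIn "TRAIN_LOG_PATH" ln) = false := he
      simp only [extractGoA, Bool.not_true, Bool.false_and, he']
      cases hfr : rest.findIdx? extractIsEnd with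
      | none => simp [he, hfr, ih]
      | some e => simp [he, hfr, ih]

theorem extractGoA_false (lines : List String) :
    extractGoA lines false = extract_torchrun_section_py_alt lines := by
  induction lines with
  | nil => rfl
  | cons ln rest ih =>
    rw [extract_torchrun_section_py_alt, List.findIdx?_cons]
    by_cases hs : extractIsStart ln = true
    · have hs' : (!false && PySem.Str.isIn "torchrun" ln && PySem.Str.isIn "pretrain_gpt.py" ln) = true := by
        simp only [Bool.not_false, Bool.true_and]; exact hs
      by_cases he : extractIsEnd ln = true
      · have he' : (PySem.Str.isIn "tee" ln && PySem.Str.isIn "TRAIN_LOG_PATH" ln) = true := he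
        simp only [extractGoA, hs', he']
        simp [hs, he, List.findIdx?_cons]
      · rw [Bool.not_eq_true] at he
        have he' : (PySem.Str.isIn "tee" ln && PySem.Str.isIn "TRAIN_LOG_PATH" ln) = false := he
        have hg : extractGoA (ln :: rest) false = ln :: extractGoA rest true := by
          simp only [extractGoA, hs', he']
          simp
        rw [hg, extractGoA_true]
        simp only [hs, if_pos rfl, List.drop_zero, List.findIdx?_cons, he, Bool.false_eq_true,
          if_false]
        cases hfr : rest.findIdx? extractIsEnd <;> simp [List.findIdx?_cons, he, hfr]
    · rw [Bool.not_eq_true] at hs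
      have hs' : (!false && PySem.Str.isIn "torchrun" ln && PySem.Str.isIn "pretrain_gpt.py" ln) = false := by
        simp only [Bool.not_false, Bool.true_and]; exact hs
      have hg : extractGoA (ln :: rest) false = extractGoA rest false := by
        simp only [extractGoA, hs']
        simp
      rw [hg, ih, hs]
      simp only [Bool.false_eq_true, if_false]
      rw [extract_torchrun_section_py_alt]
      cases hfs : rest.findIdx? extractIsStart <;> simp [List.findIdx?_cons, hs, hfs]

-- ===== VERDICT (by name: the statement is the Claim_ definition above) =====
theorem extract_torchrun_section_py_spec : Claim_equal_extract_torchrun_section_py := by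
  intro lines _
  unfold Spec_extract_torchrun_section_py extract_torchrun_section_py
  exact extractGoA_false lines
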